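-- pv_equiv track=rewrite | github.com/CERTCC/certfuzz | src/certfuzz/fuzztools/hamming.py | vector_compare
-- ===== SOURCE A (Python) =====
-- def vector_compare(v1, v2):
--     '''
--     Given two sparse vectors (lists of indices whose value is 1), return the distance between them
--     '''
--     vdict = {}
--
--     for v in v1, v2:
--         for idx in v:
--             if vdict.get(idx):
--                 vdict[idx] += 1
--             else:
--                 vdict[idx] = 1
--
--     distance = 0
--     for val in list(vdict.values()):
--         if val == 1:
--             distance += 1
--
--     return distance
-- ===== SOURCE B (Python) =====
-- def vector_compare(v1, v2):
--     '''
--     Given two sparse vectors (lists of indices whose value is 1), return the distance between them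
--     '''
--     merged = sorted(v1 + v2)
--     distance = 0
--     run = 0
--     prev = None
--     for x in merged:
--         if run and x == prev:
--             run += 1
--         else:
--             if run == 1:
--                 distance += 1
--             run = 1
--             prev = x
--     if run == 1:
--         distance += 1
--     return distance
-- ===== Notes on version B (the rewrite author's own statement) =====
-- stated objective: alternative
-- what changed: Replaces A's hash-map counting pass plus values scan with sort-the-concatenation and a single run-length scan that counts runs of length exactly 1.
import Mathlib
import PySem

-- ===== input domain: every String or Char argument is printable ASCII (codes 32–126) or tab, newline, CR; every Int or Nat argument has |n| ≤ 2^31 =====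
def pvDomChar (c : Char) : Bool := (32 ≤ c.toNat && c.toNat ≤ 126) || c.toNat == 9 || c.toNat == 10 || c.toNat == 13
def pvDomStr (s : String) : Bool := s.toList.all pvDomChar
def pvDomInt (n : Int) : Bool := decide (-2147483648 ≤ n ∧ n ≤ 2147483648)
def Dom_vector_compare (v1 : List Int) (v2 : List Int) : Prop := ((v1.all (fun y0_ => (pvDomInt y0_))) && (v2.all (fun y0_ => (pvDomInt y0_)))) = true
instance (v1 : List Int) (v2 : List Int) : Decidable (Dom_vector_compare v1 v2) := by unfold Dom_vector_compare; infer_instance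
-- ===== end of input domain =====

-- B sorts the concatenated lists and counts runs of length exactly 1 (one pass),
-- instead of A's dict-of-counts followed by a scan of its values. Same value on all inputs.

-- ===== PORT A =====
-- `if vdict.get(idx):` — Python truthiness: .get returns None (falsy) or the stored count (0 falsy);
-- that is exactly `getD idx 0 ≠ 0`.
def vcUpdate (d : PySem.Dict Int Int) (idx : Int) : PySem.Dict Int Int :=
  if d.getD idx 0 ≠ 0 then d.insert idx (d.getD idx 0 + 1) else d.insert idx 1

def vector_compare (v1 : List Int) (v2 : List Int) : Int :=
  let vdict := [v1, v2].foldl (fun d v => v.foldl vcUpdate d) PySem.Dict.empty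
  vdict.values.foldl (fun distance val => if val == 1 then distance + 1 else distance) 0

-- ===== PORT B =====
-- state = (distance, run, prev); `if run and x == prev:` (prev = None compares unequal to every int)
def vcStep (s : Int × Int × Option Int) (x : Int) : Int × Int × Option Int :=
  if s.2.1 ≠ 0 ∧ s.2.2 = some x then (s.1, s.2.1 + 1, s.2.2)
  else ((if s.2.1 == 1 then s.1 + 1 else s.1), 1, some x)

def vector_compare_alt (v1 : List Int) (v2 : List Int) : Int :=
  let merged := PySem.List.sorted (v1 ++ v2) (fun x => x) false
  let s := merged.foldl vcStep (0, 0, none)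
  if s.2.1 == 1 then s.1 + 1 else s.1

-- ===== PRECONDITION & SPEC =====
def Spec_vector_compare (v1 : List Int) (v2 : List Int) (out : Int) : Prop := out = vector_compare_alt v1 v2
instance (v1 : List Int) (v2 : List Int) (out : Int) : Decidable (Spec_vector_compare v1 v2 out) := by unfold Spec_vector_compare; infer_instance

-- ===== CLAIM (what is proved, stated in full; the proofs are below) =====
def Claim_equal_vector_compare : Prop := ∀ (v1 : List Int) (v2 : List Int), Dom_vector_compare v1 v2 → Spec_vector_compare v1 v2 (vector_compare v1 v2)

-- ===== LEMMAS AND PROOFS =====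


-- number of values occurring exactly once in M (each such value is counted at its unique position)
def vcS (M : List Int) : Int := (M.countP (fun k => M.count k == 1) : Int)

def vcFinish (s : Int × Int × Option Int) : Int := if s.2.1 == 1 then s.1 + 1 else s.1

lemma vcUpdate_eq : vcUpdate = fun d x => d.insert x (d.getD x 0 + 1) := by
  funext d x
  unfold vcUpdate
  by_cases h : d.getD x 0 = 0
  · simp [h]
  · simp [h]

lemma S_cons (y : Int) (t : List Int) :
    vcS (y :: t) = (if t.count y = 0 then (1 : Int) else 0)
      + vcS (t.filter (fun z => z ≠ y)) := by
  unfold vcS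
  have h1 : (y :: t).countP (fun k => (y :: t).count k == 1)
      = t.countP (fun k => (y :: t).count k == 1)
        + if t.count y = 0 then 1 else 0 := by
    rw [List.countP_cons]
    congr 1
    rw [List.count_cons_self]
    by_cases h : t.count y = 0
    · simp [h]
    · simp [h]
  have h2 : t.countP (fun k => (y :: t).count k == 1)
      = t.countP (fun k => (t.count k == 1) && decide (k ≠ y)) := by
    apply List.countP_congr
    intro a ha
    by_cases h : a = y
    · subst h
      have hpos : 0 < t.count a := List.count_pos_iff.2 ha
      rw [List.count_cons_self]
      simp
      omega
    · rw [List.count_cons_of_ne (Ne.symm h)]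
      simp [h]
  have h3 : t.countP (fun k => (t.count k == 1) && decide (k ≠ y))
      = (t.filter (fun z => decide (z ≠ y))).countP (fun k => t.count k == 1) := by
    rw [List.countP_filter]
  have h4 : (t.filter (fun z => decide (z ≠ y))).countP (fun k => t.count k == 1)
      = (t.filter (fun z => decide (z ≠ y))).countP
          (fun k => (t.filter (fun z => decide (z ≠ y))).count k == 1) := by
    apply List.countP_congr
    intro a ha
    have hq : decide (a ≠ y) = true := (List.mem_filter.1 ha).2
    rw [List.count_filter (p := fun z => decide (z ≠ y)) hq]
  rw [h1, h2, h3, h4]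
  by_cases h : t.count y = 0
  · simp [h]
    ring
  · simp [h]

lemma G (M : List Int) (x d r : Int) (hp : M.Pairwise (· ≤ ·)) (hx : ∀ y ∈ M, x ≤ y)
    (hr : 1 ≤ r) :
    vcFinish (M.foldl vcStep (d, r, some x)) =
      (if r + (M.count x : Int) = 1 then d + 1 else d)
        + vcS (M.filter (fun y => y ≠ x)) := by
  induction M generalizing x d r with
  | nil =>
    simp only [List.foldl_nil, vcFinish, vcS, List.count_nil, List.filter_nil, List.countP_nil]
    simp only [beq_iff_eq]
    split_ifs <;> push_cast <;> omega
  | cons y t ih =>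
    rw [List.foldl_cons]
    rcases List.pairwise_cons.1 hp with ⟨hyt, hpt⟩
    by_cases hxy : x = y
    · subst hxy
      have hstep : vcStep (d, r, some x) x = (d, r + 1, some x) := by
        simp [vcStep]
        omega
      rw [hstep, ih x d (r + 1) hpt hyt (by omega)]
      have hcnt : (x :: t).count x = t.count x + 1 := List.count_cons_self ..
      have hfil : (x :: t).filter (fun y => y ≠ x) = t.filter (fun y => y ≠ x) := by
        simp
      rw [hcnt, hfil]
      have hcast : r + ((t.count x + 1 : Nat) : Int) = r + 1 + (t.count x : Int) := by
        push_cast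
        ring
      rw [hcast]
    · have hstep : vcStep (d, r, some x) y = ((if r == 1 then d + 1 else d), 1, some y) := by
        simp [vcStep, hxy]
      rw [hstep, ih y _ 1 hpt hyt le_rfl]
      have hxt : x ∉ t := by
        intro hmem
        exact hxy (le_antisymm (hx y (List.mem_cons_self ..)) (hyt x hmem))
      have hxyt : x ∉ y :: t := by
        simp [hxy, hxt]
      have hcnt : (y :: t).count x = 0 := List.count_eq_zero.2 hxyt
      have hfil : (y :: t).filter (fun z => z ≠ x) = y :: t := by
        apply List.filter_eq_self.2
        intro a ha
        simp only [decide_eq_true_eq]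
        intro h
        exact absurd (h ▸ ha) hxyt
      rw [hcnt, hfil, S_cons y t]
      have hiff : ((1 : Int) + (t.count y : Int) = 1) ↔ t.count y = 0 := by omega
      simp only [beq_iff_eq]
      split_ifs <;> omega

lemma countP_ofList (L : List Int) (q : Int → Bool) (hq : ∀ k, q k = true → L.count k = 1) :
    (PySem.Set.ofList L).countP q = L.countP q := by
  have nd1 : ((PySem.Set.ofList L).filter q).Nodup := (PySem.Set.nodup_ofList L).filter q
  have nd2 : (L.filter q).Nodup := by
    apply List.nodup_iff_count_le_one.2
    intro a
    by_cases hqa : q a = true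
    · rw [List.count_filter hqa]
      exact le_of_eq (hq a hqa)
    · have hnm : a ∉ L.filter q := by
        intro hmem
        exact hqa (List.mem_filter.1 hmem).2
      rw [List.count_eq_zero.2 hnm]
      exact Nat.zero_le 1
  have hperm : ((PySem.Set.ofList L).filter q).Perm (L.filter q) :=
    (List.perm_ext_iff_of_nodup nd1 nd2).2 (by
      intro a
      simp [List.mem_filter, PySem.Set.mem_ofList])
  rw [List.countP_eq_length_filter, List.countP_eq_length_filter, hperm.length_eq]

lemma vcS_perm {L L' : List Int} (h : L.Perm L') : vcS L = vcS L' := by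
  unfold vcS
  congr 1
  rw [List.countP_congr (fun a _ => by rw [h.count_eq a])]
  exact h.countP_eq _

lemma A_eq (v1 v2 : List Int) : vector_compare v1 v2 = vcS (v1 ++ v2) := by
  unfold vector_compare
  rw [show  [v1, v2].foldl (fun d v => v.foldl vcUpdate d) PySem.Dict.empty
      = (v1 ++ v2).foldl vcUpdate PySem.Dict.empty by
    simp [List.foldl_append]]
  rw [vcUpdate_eq, PySem.Dict.foldl_insert_getD_add_one_eq_counter]
  rw [PySem.List.foldl_beq_add_one]
  rw [PySem.Dict.values_eq_map_keys _ (PySem.Dict.nodup_keys_counter _) 0]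
  rw [List.map_congr_left (fun k _ => PySem.Dict.getD_counter (xs := v1 ++ v2) (v := k))]
  rw [PySem.Dict.keys_counter]
  have hmap : ((PySem.Set.ofList (v1 ++ v2)).map (fun k => ((v1 ++ v2).count k : Int))).count 1
      = (PySem.Set.ofList (v1 ++ v2)).countP (fun k => (((v1 ++ v2).count k : Int)) == 1) := by
    simp [List.count, List.countP_map]
    rfl
  rw [hmap]
  rw [List.countP_congr (l := PySem.Set.ofList (v1 ++ v2))
      (p := fun k => (((v1 ++ v2).count k : Int)) == 1)
      (q := fun k => (v1 ++ v2).count k == 1)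
      (fun a _ => by
        by_cases h : (v1 ++ v2).count a = 1
        · simp [h]
        · simp
          omega)]
  rw [countP_ofList (v1 ++ v2) _ (fun k hk => by simpa using hk)]
  simp [vcS]

lemma B_eq (v1 v2 : List Int) : vector_compare_alt v1 v2 = vcS (v1 ++ v2) := by
  unfold vector_compare_alt
  have hperm := PySem.List.sorted_perm (xs := v1 ++ v2) (key := fun x => x) (rev := false)
  have hpair : (PySem.List.sorted (v1 ++ v2) (fun x => x) false).Pairwise (· ≤ ·) := by
    have := PySem.List.sorted_pairwise (xs := v1 ++ v2) (key := fun x => x)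
    simpa using this
  rw [← vcS_perm hperm]
  cases hM : PySem.List.sorted (v1 ++ v2) (fun x => x) false with
  | nil =>
    simp [vcS]
  | cons y t =>
    dsimp only
    rw [hM] at hpair
    rcases List.pairwise_cons.1 hpair with ⟨hyt, hpt⟩
    rw [List.foldl_cons]
    have hstep : vcStep (0, 0, none) y = (0, 1, some y) := by
      simp [vcStep]
    rw [hstep]
    have := G t y 0 1 hpt hyt le_rfl
    unfold vcFinish at this
    rw [this, S_cons y t]
    have hiff : ((1 : Int) + (t.count y : Int) = 1) ↔ t.count y = 0 := by omega
    split_ifs <;> omega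

-- ===== VERDICT (by name: the statement is the Claim_ definition above) =====
theorem vector_compare_spec : Claim_equal_vector_compare := by
  intro v1 v2 _
  unfold Spec_vector_compare
  rw [A_eq, B_eq]
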